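-- pv_equiv track=rewrite | github.com/lightdrk/leetcode | dp/ninja.py | ninja
-- ===== SOURCE A (Python) =====
-- from functools import cache
--
-- def ninja(n, points):
--     @cache
--     def dp(i,j):
--         if i == n:
--             return 0
--         ans = 0
--         for y in range(3):
--             if y == j:
--                 continue
--             ans = max(ans, points[i][y]+dp(i+1,y))
--         return ans
--
--     return dp(0,-1)
-- ===== SOURCE B (Python) =====
-- def ninja(n, points):
--     # Bottom-up tabulation, O(1) memory: nxt[j] = best from next day onward given previous activity j.
--     nxt = (0, 0, 0)
--     ans = 0
--     for i in range(n - 1, -1, -1):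
--         row = points[i]
--         v0, v1, v2 = row[0] + nxt[0], row[1] + nxt[1], row[2] + nxt[2]
--         ans = max(0, v0, v1, v2)
--         nxt = (max(0, v1, v2), max(0, v0, v2), max(0, v0, v1))
--     return ans
-- ===== Notes on version B (the rewrite author's own statement) =====
-- stated objective: alternative
-- what changed: Replaced the memoized top-down recursion dp(i,j) with an iterative bottom-up tabulation keeping only the three next-day values and the running answer (O(1) memory, no recursion or cache).
import Mathlib
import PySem

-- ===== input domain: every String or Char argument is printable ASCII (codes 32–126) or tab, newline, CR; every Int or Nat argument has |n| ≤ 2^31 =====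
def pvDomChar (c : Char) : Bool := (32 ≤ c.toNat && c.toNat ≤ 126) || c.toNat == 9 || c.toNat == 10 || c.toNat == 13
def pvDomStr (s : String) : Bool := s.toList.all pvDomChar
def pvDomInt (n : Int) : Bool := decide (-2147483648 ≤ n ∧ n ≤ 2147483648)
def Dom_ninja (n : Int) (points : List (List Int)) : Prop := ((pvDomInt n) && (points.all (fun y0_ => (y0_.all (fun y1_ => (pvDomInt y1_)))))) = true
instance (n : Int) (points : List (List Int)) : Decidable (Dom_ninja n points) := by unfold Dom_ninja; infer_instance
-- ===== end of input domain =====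

-- B replaces A's memoized top-down recursion with a bottom-up O(1)-memory tabulation over days.


-- ===== PORT A =====
-- dp(i, j) of A, with fuel = n - i (the recursion depth Python actually uses inside Pre_).
def dpA (points : List (List Int)) (n : Int) : Nat → Int → Int → Int
  | 0, _, _ => 0
  | f+1, i, j =>
    if i = n then 0
    else ([0, 1, 2] : List Int).foldl
      (fun ans y =>
        if y = j then ans
        else max ans ((PySem.List.pyGet? ((PySem.List.pyGet? points i).getD []) y).getD 0
                        + dpA points n f (i+1) y)) 0

def ninja (n : Int) (points : List (List Int)) : Int :=
  dpA points n n.toNat 0 (-1)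

-- ===== PORT B =====
-- one iteration of Source B's loop body; state = (nxt, ans)
def stepB (points : List (List Int)) (st : (Int × Int × Int) × Int) (i : Int) :
    (Int × Int × Int) × Int :=
  let nxt := st.1
  let row := (PySem.List.pyGet? points i).getD []
  let v0 := (PySem.List.pyGet? row 0).getD 0 + nxt.1
  let v1 := (PySem.List.pyGet? row 1).getD 0 + nxt.2.1
  let v2 := (PySem.List.pyGet? row 2).getD 0 + nxt.2.2
  ((max 0 (max v1 v2), max 0 (max v0 v2), max 0 (max v0 v1)),
   max 0 (max v0 (max v1 v2)))

def ninja_alt (n : Int) (points : List (List Int)) : Int :=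
  ((PySem.List.pyRange (n-1) (-1) (-1)).foldl (stepB points) ((0, 0, 0), 0)).2

-- ===== PRECONDITION & SPEC =====
-- Pre_ excludes exactly the inputs where Python A raises: n < 0 (unbounded recursion,
-- RecursionError), n > len(points) or a row among the first n with fewer than 3 columns
-- (IndexError).
def Pre_ninja (n : Int) (points : List (List Int)) : Prop :=
  0 ≤ n ∧ n ≤ points.length ∧ ∀ row ∈ points.take n.toNat, 3 ≤ row.length
instance (n : Int) (points : List (List Int)) : Decidable (Pre_ninja n points) := by
  unfold Pre_ninja; infer_instance
def pvWitness_ninja : Int × List (List Int) := (2, [[1, 2, 3], [4, 5, 6]])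

def Spec_ninja (n : Int) (points : List (List Int)) (out : Int) : Prop := out = ninja_alt n points
instance (n : Int) (points : List (List Int)) (out : Int) : Decidable (Spec_ninja n points out) := by unfold Spec_ninja; infer_instance

-- ===== CLAIM (what is proved, stated in full; the proofs are below) =====
def Claim_equal_ninja : Prop := ∀ (n : Int) (points : List (List Int)), Dom_ninja n points → Pre_ninja n points → Spec_ninja n points (ninja n points)

-- ===== LEMMAS AND PROOFS =====

-- after folding B's step over the first t rows from the bottom (rows n-1 down to n-t),
-- the state holds exactly A's dp values at day n-t.
lemma foldl_stepB (points : List (List Int)) (n : Int) : ∀ t : Nat,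
    ((List.range t).map (fun k : Nat => n - 1 - (k : Int))).foldl (stepB points) ((0, 0, 0), 0)
      = ((dpA points n t (n - t) 0, dpA points n t (n - t) 1, dpA points n t (n - t) 2),
          dpA points n t (n - t) (-1)) := by
  intro t
  induction t with
  | zero => simp [dpA]
  | succ t ih =>
      rw [List.range_succ, List.map_append, List.foldl_append, ih]
      have hne : ¬ (n - ((t : Int) + 1) = n) := by omega
      have h1 : n - 1 - (t : Int) = n - ((t : Int) + 1) := by omega
      have h2 : n - ((t : Int) + 1) + 1 = n - (t : Int) := by omega
      simp only [List.foldl, List.map, stepB, dpA, Nat.cast_add, Nat.cast_one, if_neg hne,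
        h1, h2, stepB]
      norm_num

-- ===== VERDICT (by name: the statement is the Claim_ definition above) =====
theorem ninja_spec : Claim_equal_ninja := by
  intro n points _ hpre
  obtain ⟨hn, -, -⟩ := hpre
  unfold Spec_ninja ninja ninja_alt
  have he : n - 1 - (-1) = n := by omega
  have hr : PySem.List.pyRange (n-1) (-1) (-1)
      = (List.range n.toNat).map (fun k : Nat => n - 1 - (k : Int)) := by
    rw [PySem.List.pyRange_neg_one, he]
  rw [hr, foldl_stepB]
  have h0 : n - (n.toNat : Int) = 0 := by omega
  rw [h0]
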